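-- pv_equiv track=rewrite | github.com/Pelldom/EmojiSpace | src/combat_resolver.py | _stable_max_key
-- ===== SOURCE A (Python) =====
-- from typing import Any, Callable, Literal, Optional
--
-- def _stable_max_key(counts: dict[str, int]) -> Optional[str]:
--     best_key = None
--     best_value = -1
--     for key in sorted(counts.keys()):
--         value = counts[key]
--         if value > best_value:
--             best_key = key
--             best_value = value
--     if best_value <= 0:
--         return None
--     return best_key
-- ===== SOURCE B (Python) =====
-- from typing import Optional
--
--
-- def _stable_max_key(counts: dict[str, int]) -> Optional[str]:
--     if not counts:
--         return None
--     max_value = max(counts.values())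
--     if max_value <= 0:
--         return None
--     return min(k for k, v in counts.items() if v == max_value)
-- ===== Notes on version B (the rewrite author's own statement) =====
-- stated objective: simpler
-- what changed: Replaces A's sort-all-keys-then-scan accumulator loop by a two-pass decomposition: take the max of the values, return None if it is <= 0, else the min of the keys attaining it.
import Mathlib
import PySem

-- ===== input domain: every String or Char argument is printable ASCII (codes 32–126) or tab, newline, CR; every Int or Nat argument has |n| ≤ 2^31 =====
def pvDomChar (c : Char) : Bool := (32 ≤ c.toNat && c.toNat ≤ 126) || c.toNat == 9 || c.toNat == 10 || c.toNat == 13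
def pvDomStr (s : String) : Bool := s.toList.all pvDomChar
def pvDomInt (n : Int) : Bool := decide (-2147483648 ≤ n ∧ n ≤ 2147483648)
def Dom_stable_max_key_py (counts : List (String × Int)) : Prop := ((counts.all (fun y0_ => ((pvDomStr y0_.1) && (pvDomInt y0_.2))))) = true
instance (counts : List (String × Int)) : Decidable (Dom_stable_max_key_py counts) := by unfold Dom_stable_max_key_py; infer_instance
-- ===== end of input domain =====

-- B replaces A's sort-all-keys-then-scan accumulator loop by a simpler decomposition: max of the values, then min of the keys attaining it.

-- ===== PORT A =====
def stable_max_key_py (counts : List (String × Int)) : Option String :=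
  let d := PySem.Dict.ofList counts
  let res := (PySem.List.sorted d.keys (fun k => k) false).foldl
    (fun (s : Option String × Int) key =>
      -- counts[key]: key ∈ keys so the lookup always succeeds; getD 0 is exact here
      let value := d.getD key 0
      if value > s.2 then (some key, value) else s)
    ((none : Option String), (-1 : Int))
  if res.2 ≤ 0 then none else res.1

-- ===== PORT B =====
def stable_max_key_py_alt (counts : List (String × Int)) : Option String :=
  let d := PySem.Dict.ofList counts
  if d.items = [] then none
  else
    match PySem.List.max? d.values (fun v => v) with
    | none => none  -- unreachable: values is nonempty here
    | some mx =>
      if mx ≤ 0 then none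
      else PySem.List.min? ((d.items.filter (fun p => p.2 == mx)).map (·.1)) (fun k => k)

-- ===== PRECONDITION & SPEC =====
def Spec_stable_max_key_py (counts : List (String × Int)) (out : Option String) : Prop := out = stable_max_key_py_alt counts
instance (counts : List (String × Int)) (out : Option String) : Decidable (Spec_stable_max_key_py counts out) := by unfold Spec_stable_max_key_py; infer_instance

-- ===== CLAIM (what is proved, stated in full; the proofs are below) =====
def Claim_equal_stable_max_key_py : Prop := ∀ (counts : List (String × Int)), Dom_stable_max_key_py counts → Spec_stable_max_key_py counts (stable_max_key_py counts)

-- ===== LEMMAS AND PROOFS =====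

-- the running maximum A's fold maintains in its second component
def runMax (f : String → Int) (ks : List String) (bv : Int) : Int :=
  ks.foldl (fun a k => max a (f k)) bv

theorem runMax_ge (f : String → Int) (ks : List String) (bv : Int) : bv ≤ runMax f ks bv := by
  induction ks generalizing bv with
  | nil => simp [runMax]
  | cons k t ih => exact le_trans (le_max_left _ _) (ih (max bv (f k)))

theorem runMax_ge_mem (f : String → Int) (ks : List String) (bv : Int) :
    ∀ k ∈ ks, f k ≤ runMax f ks bv := by
  induction ks generalizing bv with
  | nil => simp
  | cons k t ih =>
    intro x hx
    rcases List.mem_cons.mp hx with hx | hx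
    · subst hx; exact le_trans (le_max_right _ _) (runMax_ge f t _)
    · exact ih _ x hx

theorem runMax_of_all_le (f : String → Int) (ks : List String) (bv : Int)
    (h : ∀ k ∈ ks, f k ≤ bv) : runMax f ks bv = bv := by
  induction ks generalizing bv with
  | nil => rfl
  | cons k t ih =>
    have hm : max bv (f k) = bv := max_eq_left (h k (by simp))
    show runMax f t (max bv (f k)) = bv
    rw [hm]
    exact ih bv (fun x hx => h x (by simp [hx]))

-- characterisation of A's accumulator fold: final value is the running max,
-- final key is the first key attaining it (when anything beat the seed)
theorem foldA_char (f : String → Int) (ks : List String) (ob : Option String) (bv : Int) :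
    ks.foldl (fun (s : Option String × Int) k => if f k > s.2 then (some k, f k) else s) (ob, bv)
      = (if ∃ k ∈ ks, bv < f k then (ks.filter (fun k => f k == runMax f ks bv)).head? else ob,
         runMax f ks bv) := by
  induction ks generalizing ob bv with
  | nil => simp [runMax]
  | cons k t ih =>
    simp only [List.foldl_cons]
    by_cases hk : f k > bv
    · rw [if_pos hk, ih (some k) (f k)]
      have hrm : runMax f (k :: t) bv = runMax f t (f k) := by
        show runMax f t (max bv (f k)) = _
        rw [max_eq_right (le_of_lt hk)]
      rw [hrm, if_pos (⟨k, by simp, hk⟩ : ∃ x ∈ k :: t, bv < f x)]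
      by_cases ht : ∃ x ∈ t, f k < f x
      · rw [if_pos ht]
        obtain ⟨x, hx, hlt⟩ := ht
        have hne : ¬ (f k == runMax f t (f k)) = true := by
          simp only [beq_iff_eq]
          intro he
          exact absurd (lt_of_lt_of_le hlt (runMax_ge_mem f t (f k) x hx)) (by omega)
        simp [hne]
      · rw [if_neg ht]
        push_neg at ht
        have hrm2 : runMax f t (f k) = f k := runMax_of_all_le f t (f k) ht
        have heq : (f k == runMax f t (f k)) = true := by simp [hrm2]
        simp [heq]
    · rw [if_neg hk, ih ob bv]
      push_neg at hk
      have hrm : runMax f (k :: t) bv = runMax f t bv := by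
        show runMax f t (max bv (f k)) = _
        rw [max_eq_left hk]
      rw [hrm]
      have hcond : (∃ x ∈ k :: t, bv < f x) ↔ (∃ x ∈ t, bv < f x) := by
        constructor
        · rintro ⟨x, hx, hlt⟩
          rcases List.mem_cons.mp hx with hx | hx
          · subst hx; omega
          · exact ⟨x, hx, hlt⟩
        · rintro ⟨x, hx, hlt⟩; exact ⟨x, by simp [hx], hlt⟩
      by_cases ht : ∃ x ∈ t, bv < f x
      · rw [if_pos ht, if_pos (hcond.mpr ht)]
        obtain ⟨x, hx, hlt⟩ := ht
        have hne : ¬ (f k == runMax f t bv) = true := by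
          simp only [beq_iff_eq]
          intro he
          have := lt_of_lt_of_le hlt (runMax_ge_mem f t bv x hx)
          omega
        simp [hne]
      · rw [if_neg ht, if_neg (fun h => ht (hcond.mp h))]

-- foldl min: the result is a member of seed :: list, and a lower bound of it
theorem foldl_min_mem (t : List String) (a : String) : t.foldl min a ∈ a :: t := by
  induction t generalizing a with
  | nil => simp
  | cons x xs ih =>
    simp only [List.foldl_cons]
    rcases List.mem_cons.mp (ih (min a x)) with h | h
    · rw [h]
      rcases min_cases a x with ⟨he, _⟩ | ⟨he, _⟩ <;> simp [he]
    · simp [h]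

theorem foldl_min_le (t : List String) (a : String) : ∀ x ∈ a :: t, t.foldl min a ≤ x := by
  induction t generalizing a with
  | nil => simp
  | cons y ys ih =>
    intro x hx
    simp only [List.foldl_cons]
    simp only [List.mem_cons] at hx
    rcases hx with hx | hx | hx
    · subst hx; exact le_trans (ih (min x y) _ (by simp)) (min_le_left x y)
    · subst hx; exact le_trans (ih (min a x) _ (by simp)) (min_le_right a x)
    · exact ih (min a y) x (by simp [hx])

-- foldl max, peeling the seed apart
theorem foldl_max_seed (t : List Int) (a b : Int) :
    t.foldl max (max a b) = max a (t.foldl max b) := by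
  induction t generalizing b with
  | nil => rfl
  | cons x xs ih =>
    simp only [List.foldl_cons]
    rw [max_assoc, ih]

-- main equivalence
theorem stable_max_key_eq (counts : List (String × Int)) :
    stable_max_key_py counts = stable_max_key_py_alt counts := by
  unfold stable_max_key_py stable_max_key_py_alt
  dsimp only
  simp only [foldA_char]
  set d := PySem.Dict.ofList counts with hd
  have hnd : d.keys.Nodup := PySem.Dict.nodup_keys_ofList counts
  set f : String → Int := fun k => d.getD k 0 with hf
  set S : List String := PySem.List.sorted d.keys (fun k => k) false with hS
  have hSperm : S.Perm d.keys := PySem.List.sorted_perm d.keys (fun k => k) false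
  have hSpw : S.Pairwise (fun a b => a ≤ b) := PySem.List.sorted_pairwise d.keys (fun k => k)
  have hvals : d.values = d.keys.map f := PySem.Dict.values_eq_map_keys d hnd 0
  have hitems : d.items = d.keys.map (fun k => (k, f k)) := PySem.Dict.items_eq_map_keys d hnd 0
  by_cases hemp : d.items = []
  · have hk0 : d.keys = [] := by simp [PySem.Dict.keys, hemp]
    have hS0 : S = [] := List.Perm.eq_nil (hk0 ▸ hSperm)
    simp [hemp, hS0, runMax]
  · rw [if_neg hemp]
    obtain ⟨p, it, hitcons⟩ := List.exists_cons_of_ne_nil hemp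
    have hv : d.values = p.2 :: it.map (·.2) := by simp [PySem.Dict.values, hitcons]
    rw [hv, PySem.List.max?_id_cons]
    set v : Int := p.2 with hvdef
    set vt : List Int := it.map (·.2) with hvtdef
    set mx : Int := vt.foldl max v with hmx
    dsimp only
    have hrunperm : runMax f S (-1) = runMax f d.keys (-1) :=
      List.Perm.foldl_eq' (f := fun a k => max a (f k)) hSperm
        (fun x _ y _ z => max_right_comm z (f x) (f y)) (-1)
    have hrunkeys : runMax f d.keys (-1) = max (-1) mx := by
      unfold runMax
      rw [← List.foldl_map, ← hvals, hv]
      simp only [List.foldl_cons]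
      rw [foldl_max_seed vt (-1) v, ← hmx]
    have hrun : runMax f S (-1) = max (-1) mx := hrunperm.trans hrunkeys
    by_cases hle : mx ≤ 0
    · rw [if_pos hle, if_pos (show runMax f S (-1) ≤ 0 by rw [hrun]; omega)]
    · push_neg at hle
      have hrunmx : runMax f S (-1) = mx := by rw [hrun]; omega
      rw [if_neg (by omega : ¬ mx ≤ 0), if_neg (show ¬ runMax f S (-1) ≤ 0 by omega)]
      -- mx is attained at some key k0
      have hmem : mx ∈ d.values :=
        PySem.List.max?_mem (by rw [hv, PySem.List.max?_id_cons, ← hmx])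
      obtain ⟨k0, hk0, hfk0⟩ : ∃ k ∈ d.keys, f k = mx := by
        rw [hvals, List.mem_map] at hmem; exact hmem
      have hcond : ∃ k ∈ S, (-1 : Int) < f k :=
        ⟨k0, (List.Perm.mem_iff hSperm).mpr hk0, by omega⟩
      rw [if_pos hcond, hrunmx]
      -- both sides pick keys with value mx; A the head of the sorted list, B the min
      have hBlist : (d.items.filter (fun p => p.2 == mx)).map (·.1)
          = d.keys.filter (fun k => f k == mx) := by
        rw [hitems, List.filter_map, List.map_map]
        simp [Function.comp_def]
      have hfilperm : (S.filter (fun k => f k == mx)).Perm (d.keys.filter (fun k => f k == mx)) :=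
        List.Perm.filter _ hSperm
      have hfilmem : k0 ∈ S.filter (fun k => f k == mx) := by
        rw [List.mem_filter]
        exact ⟨(List.Perm.mem_iff hSperm).mpr hk0, by simp [hfk0]⟩
      obtain ⟨h0, t0, hfil⟩ := List.exists_cons_of_ne_nil (List.ne_nil_of_mem hfilmem)
      rw [hfil]
      have hBne : (d.items.filter (fun p => p.2 == mx)).map (·.1) ≠ [] := by
        rw [hBlist]
        intro h
        rw [hfil, h] at hfilperm
        exact List.cons_ne_nil _ _ (List.Perm.eq_nil hfilperm)
      obtain ⟨b0, bt, hB⟩ := List.exists_cons_of_ne_nil hBne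
      rw [hB, PySem.List.min?_id_cons]
      -- foldl min over b0 :: bt equals h0: h0 is a lower bound of the filtered keys, and a member
      have hpermB : (b0 :: bt).Perm (h0 :: t0) := by
        rw [← hB, ← hfil, hBlist]
        exact hfilperm.symm
      have hfilpw : (h0 :: t0).Pairwise (fun a b => a ≤ b) := by
        rw [← hfil]
        exact List.Pairwise.sublist List.filter_sublist hSpw
      have hlb : ∀ x ∈ b0 :: bt, h0 ≤ x := by
        intro x hx
        rcases List.mem_cons.mp ((List.Perm.mem_iff hpermB).mp hx) with hx' | hx'
        · exact le_of_eq hx'.symm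
        · exact (List.pairwise_cons.mp hfilpw).1 x hx'
      have hmemfold : bt.foldl min b0 ∈ b0 :: bt := foldl_min_mem bt b0
      have hh0mem : h0 ∈ b0 :: bt := (List.Perm.mem_iff hpermB).mpr (by simp)
      have hfold : bt.foldl min b0 = h0 :=
        le_antisymm (foldl_min_le bt b0 h0 hh0mem) (hlb _ hmemfold)
      rw [hfold]
      rfl

-- ===== VERDICT (by name: the statement is the Claim_ definition above) =====
theorem stable_max_key_py_spec : Claim_equal_stable_max_key_py := by
  intro counts _
  unfold Spec_stable_max_key_py
  exact stable_max_key_eq counts
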